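-- pv_equiv track=rewrite | github.com/AdamZhouSE/pythonHomework | Code/CodeRecords/2608/58822/277120.py | dfs
-- ===== SOURCE A (Python) =====
-- yuanyin = ['a', 'e', 'i', 'o', 'u']
--
-- def dfs(s):
--     if len(s) == 1:
--         return ['', s]
--     p1 = dfs(s[:-1])
--     p2 = []
--     for tmp in p1:
--         if tmp == '' or tmp[0] in yuanyin:
--             p2.append(tmp + s[-1])
--     return p1 + p2
-- ===== SOURCE B (Python) =====
-- yuanyin = ['a', 'e', 'i', 'o', 'u']
--
-- def dfs(s):
--     res = ['', s[0]]
--     for c in s[1:]: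
--         res = res + [t + c for t in res if t == '' or t[0] in yuanyin]
--     return res
-- ===== Notes on version B (the rewrite author's own statement) =====
-- stated objective: simpler
-- what changed: The suffix-peeling recursion (dfs(s[:-1]) plus an explicit append loop) is replaced by a single iterative left-to-right fold that maintains the running result list; Pre_ excludes only the empty string, on which A raises RecursionError (and B IndexError).
import Mathlib
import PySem

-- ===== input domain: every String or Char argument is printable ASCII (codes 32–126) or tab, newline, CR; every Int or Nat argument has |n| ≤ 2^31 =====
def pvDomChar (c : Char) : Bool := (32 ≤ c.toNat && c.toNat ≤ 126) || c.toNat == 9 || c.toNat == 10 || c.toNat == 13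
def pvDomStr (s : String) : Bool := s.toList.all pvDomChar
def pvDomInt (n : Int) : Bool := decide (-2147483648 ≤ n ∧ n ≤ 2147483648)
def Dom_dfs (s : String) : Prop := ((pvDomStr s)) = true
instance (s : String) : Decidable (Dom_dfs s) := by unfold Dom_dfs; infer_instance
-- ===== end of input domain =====

-- B replaces A's suffix-peeling recursion by one iterative left-to-right fold over the
-- characters (objective: simpler). Both raise on the empty string (A: RecursionError,
-- B: IndexError), which Pre_dfs excludes.

-- shared module constant and the shared filter condition "tmp == '' or tmp[0] in yuanyin"
def yuanyin : List Char := ['a', 'e', 'i', 'o', 'u']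

def pvOk (t : String) : Bool :=
  t == "" || (match t.toList with
              | c :: _ => yuanyin.contains c
              | [] => false)

-- ===== PORT A =====
-- recursion on the character list; the [] branch is unreachable under Pre_dfs
-- (Python A recurses forever on '')
def dfsA : List Char → List String
  | [] => []
  | x :: xs =>
    if (x :: xs).length = 1 then ["", String.ofList (x :: xs)]
    else
      let p1 := dfsA (x :: xs).dropLast
      let p2 := p1.foldl
        (fun acc tmp => if pvOk tmp then acc ++ [tmp.push ((x :: xs).getLastD ' ')] else acc) []
      p1 ++ p2
termination_by l => l.length
decreasing_by simp

def dfs (s : String) : List String := dfsA s.toList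

-- ===== PORT B =====
-- iterative fold: res = ['', s[0]]; for c in s[1:]: res += [t + c for t in res if ok t]
def dfs_alt (s : String) : List String :=
  match s.toList with
  | [] => []
  | c :: rest =>
    rest.foldl (fun res d => res ++ (res.filter pvOk).map (fun t => t.push d))
      ["", String.ofList [c]]

-- ===== PRECONDITION & SPEC =====
-- Pre_dfs excludes only the empty string, on which A raises RecursionError (and B IndexError)
def Pre_dfs (s : String) : Prop := s ≠ ""
instance (s : String) : Decidable (Pre_dfs s) := by unfold Pre_dfs; infer_instance
def pvWitness_dfs : String := "ab"

def Spec_dfs (s : String) (out : List String) : Prop := out = dfs_alt s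
instance (s : String) (out : List String) : Decidable (Spec_dfs s out) := by unfold Spec_dfs; infer_instance

-- ===== CLAIM (what is proved, stated in full; the proofs are below) =====
def Claim_equal_dfs : Prop := ∀ (s : String), Dom_dfs s → Pre_dfs s → Spec_dfs s (dfs s)

-- ===== LEMMAS AND PROOFS =====

theorem dfsA_cons (x : Char) (xs : List Char) :
    dfsA (x :: xs) =
      xs.foldl (fun res d => res ++ (res.filter pvOk).map (fun t => t.push d))
        ["", String.ofList [x]] := by
  induction xs using List.reverseRecOn with
  | nil => simp [dfsA]
  | append_singleton ys d ih =>
    rw [dfsA]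
    have hlen : (x :: (ys ++ [d])).length ≠ 1 := by simp
    rw [if_neg hlen]
    have hdrop : (x :: (ys ++ [d])).dropLast = x :: ys := by
      simpa using List.dropLast_concat (l₁ := x :: ys) (b := d)
    have hlast : (x :: (ys ++ [d])).getLastD ' ' = d := by
      simp [List.getLastD]
    simp only [hdrop, hlast, ih, PySem.List.foldl_append_if, List.nil_append, List.foldl_append,
      List.foldl_cons, List.foldl_nil]

theorem toList_ne_nil_of_ne_empty (s : String) (h : s ≠ "") : s.toList ≠ [] := by
  intro hnil
  apply h
  have := congrArg String.ofList hnil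
  simpa using this

-- ===== VERDICT (by name: the statement is the Claim_ definition above) =====
theorem dfs_spec : Claim_equal_dfs := by
  intro s _ hpre
  unfold Spec_dfs dfs dfs_alt
  have hne := toList_ne_nil_of_ne_empty s hpre
  cases hl : s.toList with
  | nil => exact absurd hl hne
  | cons c rest => simpa using dfsA_cons c rest
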